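-- pv_equiv track=rewrite | github.com/garricn/tradedata | src/tradedata/cli/commands/sync.py | _parse_types_option
-- ===== SOURCE A (Python) =====
-- from typing import Optional
--
-- def _parse_types_option(types: Optional[tuple[str, ...]]) -> Optional[list[str]]:
--     """Flatten repeatable/CSV types into a list."""
--     if not types:
--         return None
--     flattened: list[str] = []
--     for entry in types:
--         parts = [part.strip() for part in entry.replace(",", " ").split() if part.strip()]
--         flattened.extend(parts)
--     return flattened or None
-- ===== SOURCE B (Python) =====
-- from typing import Optional
--
--
-- def _parse_types_option(types: Optional[tuple[str, ...]]) -> Optional[list[str]]: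
--     """Flatten repeatable/CSV types via a character-level scanner.
--
--     Instead of replace/split per entry, walk each entry character by
--     character, treating ',' and whitespace as token separators, and emit
--     the accumulated token whenever a separator (or the end) is reached.
--     """
--     if not types:
--         return None
--     flattened: list[str] = []
--     for entry in types:
--         cur: list[str] = []
--         for ch in entry:
--             if ch == ',' or ch.isspace():
--                 if cur:
--                     flattened.append(''.join(cur))
--                     cur = []
--             else:
--                 cur.append(ch)
--         if cur:
--             flattened.append(''.join(cur))
--     return flattened or None
-- ===== Notes on version B (the rewrite author's own statement) =====
-- stated objective: alternative
-- what changed: Replaces A's per-entry replace-comma/split/strip-filter/extend string pipeline with an explicit character-level state machine: scan each entry character by character with a current-token accumulator, flushing the token on ',' or whitespace; no replace, split or strip calls remain.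
import Mathlib
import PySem

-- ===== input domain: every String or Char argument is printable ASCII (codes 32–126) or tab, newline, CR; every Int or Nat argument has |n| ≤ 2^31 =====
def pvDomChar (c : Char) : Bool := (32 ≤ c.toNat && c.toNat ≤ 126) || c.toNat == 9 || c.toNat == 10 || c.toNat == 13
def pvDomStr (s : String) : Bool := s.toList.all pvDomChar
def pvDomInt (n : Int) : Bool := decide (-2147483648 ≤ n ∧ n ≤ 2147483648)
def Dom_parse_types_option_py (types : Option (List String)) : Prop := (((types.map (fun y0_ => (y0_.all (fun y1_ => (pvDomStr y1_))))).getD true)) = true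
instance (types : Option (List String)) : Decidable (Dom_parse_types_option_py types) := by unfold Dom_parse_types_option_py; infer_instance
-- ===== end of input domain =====

-- B replaces A's per-entry replace/split/strip pipeline with a character-level scanner that flushes the current token on ',' or whitespace; alternative decomposition, same result.


-- ===== PORT A =====
def parse_types_option_py (types : Option (List String)) : Option (List String) :=
  match types with
  | none => none
  | some ts =>
    if ts = [] then none
    else
      let flattened := ts.foldl (fun acc entry =>
        acc ++ ((PySem.Str.split₀ (PySem.Str.replace entry "," " ")).filter
                  (fun part => PySem.Str.strip part ≠ "")).map PySem.Str.strip) []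
      if flattened = [] then none else some flattened

-- ===== PORT B =====
-- inner character loop of Source B: scan the entry, flushing cur on ',' or whitespace
def pvFlushTokens (s : List Char) (acc : List String) (cur : List Char) : List String :=
  match s with
  | [] => if cur = [] then acc else acc ++ [String.ofList cur]
  | c :: rest =>
    if c = ',' ∨ PySem.Chars.isspace c then
      if cur = [] then pvFlushTokens rest acc []
      else pvFlushTokens rest (acc ++ [String.ofList cur]) []
    else pvFlushTokens rest acc (cur ++ [c])

def parse_types_option_py_alt (types : Option (List String)) : Option (List String) :=
  match types with
  | none => none
  | some ts =>
    if ts = [] then none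
    else
      let flattened := ts.foldl (fun acc entry => pvFlushTokens entry.toList acc []) []
      if flattened = [] then none else some flattened

-- ===== PRECONDITION & SPEC =====
def Spec_parse_types_option_py (types : Option (List String)) (out : Option (List String)) : Prop := out = parse_types_option_py_alt types
instance (types : Option (List String)) (out : Option (List String)) : Decidable (Spec_parse_types_option_py types out) := by unfold Spec_parse_types_option_py; infer_instance

-- ===== CLAIM (what is proved, stated in full; the proofs are below) =====
def Claim_equal_parse_types_option_py : Prop := ∀ (types : Option (List String)), Dom_parse_types_option_py types → Spec_parse_types_option_py types (parse_types_option_py types)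

-- ===== LEMMAS AND PROOFS =====

-- str.replace(",", " ") is the character map sending ',' to ' '
def pvCom (c : Char) : Char := if c = ',' then ' ' else c

theorem replace_go_comma (fuel : Nat) : ∀ (l acc : List Char), l.length ≤ fuel →
    PySem.Chars.replace.go [','] [' '] fuel l acc = acc.reverse ++ l.map pvCom := by
  induction fuel with
  | zero =>
    intro l acc h
    have : l = [] := List.eq_nil_of_length_eq_zero (Nat.le_zero.mp h)
    subst this
    simp [PySem.Chars.replace.go]
  | succ n ih =>
    intro l acc h
    cases l with
    | nil => simp [PySem.Chars.replace.go]
    | cons c t =>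
      simp only [PySem.Chars.replace.go]
      by_cases hc : c = ','
      · subst hc
        rw [if_pos (by simp [List.isPrefixOf])]
        rw [ih _ _ (by simpa using Nat.le_of_succ_le_succ h)]
        simp [pvCom]
      · rw [if_neg (by simp only [List.isPrefixOf, Bool.and_true, beq_iff_eq]; intro h; exact hc h.symm)]
        rw [ih _ _ (by simpa using Nat.le_of_succ_le_succ h)]
        simp [pvCom, hc]

theorem replace_comma (s : List Char) :
    PySem.Chars.replace s [','] [' '] = s.map pvCom := by
  simp [PySem.Chars.replace, replace_go_comma s.length s [] le_rfl]

-- the accumulator of split₀.go is purely prepended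
theorem split₀_go_acc (s : List Char) : ∀ (cur : List Char) (acc : List (List Char)),
    PySem.Chars.split₀.go s cur acc = acc.reverse ++ PySem.Chars.split₀.go s cur [] := by
  induction s with
  | nil =>
    intro cur acc
    by_cases h : cur.isEmpty
    · simp [PySem.Chars.split₀.go, h]
    · simp [PySem.Chars.split₀.go, h]
  | cons c rest ih =>
    intro cur acc
    by_cases hs : PySem.Chars.isspace c
    · by_cases h : cur.isEmpty
      · simp only [PySem.Chars.split₀.go, hs, h, if_true]
        exact ih [] acc
      · simp only [PySem.Chars.split₀.go, hs, h, if_true]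
        rw [ih [] (cur.reverse :: acc), ih [] [cur.reverse]]
        simp
    · simp only [PySem.Chars.split₀.go, hs]
      exact ih (c :: cur) acc

-- the separator test of B's scanner agrees with whitespace after the comma map
theorem sep_iff (c : Char) : (c = ',' ∨ PySem.Chars.isspace c = true) ↔ PySem.Chars.isspace (pvCom c) = true := by
  by_cases hc : c = ','
  · subst hc; simp [pvCom]; decide
  · simp [pvCom, hc]

-- plain equation for one step of split₀.go
theorem go_cons (c : Char) (rest cur : List Char) (acc : List (List Char)) :
    PySem.Chars.split₀.go (c::rest) cur acc =
      if PySem.Chars.isspace c then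
        (if cur.isEmpty then PySem.Chars.split₀.go rest [] acc
         else PySem.Chars.split₀.go rest [] (cur.reverse::acc))
      else PySem.Chars.split₀.go rest (c::cur) acc := rfl

-- B's scanner computes the tokens of split₀ after the comma map
theorem flush_eq (s : List Char) : ∀ (acc : List String) (cur : List Char),
    pvFlushTokens s acc cur
      = acc ++ (PySem.Chars.split₀.go (s.map pvCom) cur.reverse []).map String.ofList := by
  induction s with
  | nil =>
    intro acc cur
    by_cases h : cur = []
    · simp [pvFlushTokens, PySem.Chars.split₀.go, h]
    · have hni : ¬ cur.reverse.isEmpty = true := by simp [List.isEmpty_iff, h]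
      simp only [pvFlushTokens, List.map_nil, PySem.Chars.split₀.go, if_neg h, if_neg hni]
      simp
  | cons c rest ih =>
    intro acc cur
    rw [List.map_cons, go_cons]
    by_cases hsep : c = ',' ∨ PySem.Chars.isspace c = true
    · have hsp : PySem.Chars.isspace (pvCom c) = true := (sep_iff c).mp hsep
      rw [if_pos hsp]
      by_cases h : cur = []
      · subst h
        simp only [pvFlushTokens, if_pos hsep, List.reverse_nil, List.isEmpty_nil]
        exact ih acc []
      · have hni : ¬ cur.reverse.isEmpty = true := by simp [List.isEmpty_iff, h]
        rw [if_neg hni, split₀_go_acc _ [] [cur.reverse.reverse]]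
        simp only [pvFlushTokens, if_pos hsep, if_neg h]
        rw [ih]
        simp
    · have hc : ¬ c = ',' := fun hh => hsep (Or.inl hh)
      have hsp : ¬ PySem.Chars.isspace (pvCom c) = true := fun hh => hsep ((sep_iff c).mpr hh)
      rw [if_neg hsp]
      simp only [pvFlushTokens, if_neg hsep]
      rw [ih]
      simp [pvCom, hc]

-- every token of split₀ is non-empty and whitespace-free
theorem split₀_go_tokens (s : List Char) : ∀ (cur : List Char) (acc : List (List Char)),
    (∀ c ∈ cur, PySem.Chars.isspace c = false) →
    (∀ t ∈ acc, t ≠ [] ∧ ∀ c ∈ t, PySem.Chars.isspace c = false) →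
    ∀ t ∈ PySem.Chars.split₀.go s cur acc, t ≠ [] ∧ ∀ c ∈ t, PySem.Chars.isspace c = false := by
  induction s with
  | nil =>
    intro cur acc hcur hacc t ht
    by_cases h : cur.isEmpty
    · simp only [PySem.Chars.split₀.go, h, if_true, List.mem_reverse] at ht
      exact hacc t ht
    · simp only [PySem.Chars.split₀.go] at ht
      rw [if_neg h, List.mem_reverse] at ht
      rcases List.mem_cons.mp ht with h1 | h2
      · subst h1
        refine ⟨by simpa [List.isEmpty_iff] using h, ?_⟩
        intro c hc; exact hcur c (List.mem_reverse.mp hc)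
      · exact hacc t h2
  | cons c rest ih =>
    intro cur acc hcur hacc t ht
    by_cases hs : PySem.Chars.isspace c
    · by_cases h : cur.isEmpty
      · simp only [PySem.Chars.split₀.go, hs, h, if_true] at ht
        exact ih [] acc (by simp) hacc t ht
      · simp only [PySem.Chars.split₀.go, hs, if_true] at ht
        rw [if_neg h] at ht
        refine ih [] (cur.reverse :: acc) (by simp) ?_ t ht
        intro u hu
        rcases List.mem_cons.mp hu with h1 | h2
        · subst h1
          exact ⟨by simpa [List.isEmpty_iff] using h, fun d hd => hcur d (List.mem_reverse.mp hd)⟩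
        · exact hacc u h2
    · simp only [PySem.Chars.split₀.go] at ht
      rw [if_neg hs] at ht
      refine ih (c :: cur) acc ?_ hacc t ht
      intro d hd
      rcases List.mem_cons.mp hd with h1 | h2
      · subst h1; simpa using hs
      · exact hcur d h2

theorem split₀_tokens (s : List Char) :
    ∀ t ∈ PySem.Chars.split₀ s, t ≠ [] ∧ ∀ c ∈ t, PySem.Chars.isspace c = false :=
  split₀_go_tokens s [] [] (by simp) (by simp)

theorem dropWhile_nospace (t : List Char) (h : ∀ c ∈ t, PySem.Chars.isspace c = false) :
    List.dropWhile PySem.Chars.isspace t = t :=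
  List.dropWhile_eq_self_iff.mpr (fun hl => by simp [h t[0] (List.getElem_mem hl)])

theorem strip_of_nospace (t : List Char) (h : ∀ c ∈ t, PySem.Chars.isspace c = false) :
    PySem.Chars.strip t = t := by
  simp only [PySem.Chars.strip, PySem.Chars.lstrip, PySem.Chars.rstrip, dropWhile_nospace t h]
  rw [dropWhile_nospace t.reverse (fun c hc => h c (List.mem_reverse.mp hc))]
  simp

-- A's per-entry comprehension is the plain split of the comma-replaced entry
theorem entry_parts (e : String) :
    ((PySem.Str.split₀ (PySem.Str.replace e "," " ")).filter
        (fun part => PySem.Str.strip part ≠ "")).map PySem.Str.strip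
      = PySem.Str.split₀ (PySem.Str.replace e "," " ") := by
  have htok : ∀ p ∈ PySem.Str.split₀ (PySem.Str.replace e "," " "), PySem.Str.strip p = p ∧ p ≠ "" := by
    intro p hp
    have hmem : p.toList ∈ PySem.Chars.split₀ (PySem.Str.replace e "," " ").toList := by
      rw [← PySem.Str.split₀_map_toList]
      exact List.mem_map_of_mem hp
    obtain ⟨hne, hns⟩ := split₀_tokens _ _ hmem
    have hstrip : PySem.Str.strip p = p := by
      apply String.toList_inj.mp
      rw [PySem.Str.toList_strip]
      exact strip_of_nospace _ hns
    refine ⟨hstrip, ?_⟩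
    intro h0
    exact hne (by simp [h0])
  rw [List.filter_eq_self.mpr (fun p hp => by
      simp [(htok p hp).1, (htok p hp).2])]
  exact List.map_congr_left (fun p hp => (htok p hp).1) |>.trans (List.map_id _)

-- Str.split₀ as the String.ofList image of the character-level split
theorem str_split₀_eq (s : String) :
    PySem.Str.split₀ s = (PySem.Chars.split₀ s.toList).map String.ofList := by
  rw [← PySem.Str.split₀_map_toList, List.map_map]
  exact ((List.map_congr_left (fun p _ => String.ofList_toList)).trans (List.map_id _)).symm

-- B's per-entry scan equals A's per-entry comprehension
theorem entry_eq (acc : List String) (e : String) :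
    pvFlushTokens e.toList acc []
      = acc ++ ((PySem.Str.split₀ (PySem.Str.replace e "," " ")).filter
                  (fun part => PySem.Str.strip part ≠ "")).map PySem.Str.strip := by
  rw [entry_parts, flush_eq, str_split₀_eq]
  have : (PySem.Str.replace e "," " ").toList = e.toList.map pvCom := by
    rw [PySem.Str.toList_replace]
    exact replace_comma e.toList
  rw [this]
  rfl

-- ===== VERDICT (by name: the statement is the Claim_ definition above) =====
theorem parse_types_option_py_spec : Claim_equal_parse_types_option_py := by
  intro types _
  unfold Spec_parse_types_option_py parse_types_option_py parse_types_option_py_alt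
  cases types with
  | none => rfl
  | some ts =>
    by_cases hts : ts = []
    · simp [hts]
    · simp only [if_neg hts]
      have : (fun (acc : List String) (entry : String) => pvFlushTokens entry.toList acc [])
          = fun acc entry =>
              acc ++ ((PySem.Str.split₀ (PySem.Str.replace entry "," " ")).filter
                        (fun part => PySem.Str.strip part ≠ "")).map PySem.Str.strip := by
        funext acc entry
        exact entry_eq acc entry
      rw [this]
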